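-- pv_equiv track=rewrite | github.com/graphanalytics/gatk | src/main/python/org/broadinstitute/hellbender/gcnvkernel/postprocess/viterbi_segmentation.py | coalesce_seq_into_segments
-- ===== SOURCE A (Python) =====
-- from typing import List, Tuple, Dict, Set, Optional, TypeVar
-- import itertools
--
-- def coalesce_seq_into_segments(seq: List[TypeVar('_T')]) -> List[Tuple[TypeVar('_T'), int, int]]:
--     """Coalesces a sequence of objects into piecewise constant segments, along with start and end indices
--     for each constant segment.
--
--     Example:
--         seq = ['a', 'a', 'a', 'a', 'b', 'c', 'c', 'a', 'a', 'a']
--         result = [('a', 0, 3), ('b', 4, 4), ('c', 5, 6), ('a', 7, 9)]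
--
--     Args:
--         seq: a sequence of objects that implement __equals__
--
--     Returns:
--         a generator for (object, start_index, end_index)
--     """
--     for seg in itertools.groupby(enumerate(seq), key=lambda elem: elem[1]):
--         seg_const = seg[0]
--         grouper = seg[1]
--         start_index = grouper.__next__()[0]
--         end_index = start_index
--         try:
--             while True:
--                 end_index = grouper.__next__()[0]
--         except StopIteration:
--             pass
--         yield (seg_const, start_index, end_index)
-- ===== SOURCE B (Python) =====
-- from typing import List, Tuple, TypeVar
--
-- def coalesce_seq_into_segments(seq: List[TypeVar('_T')]) -> List[Tuple[TypeVar('_T'), int, int]]: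
--     """Flat boundary-tracking loop: one pass, no groupby, no sub-iterators."""
--     if not seq:
--         return
--     start = 0
--     prev = seq[0]
--     for i in range(1, len(seq)):
--         if seq[i] != prev:
--             yield (prev, start, i - 1)
--             start = i
--             prev = seq[i]
--     yield (prev, start, len(seq) - 1)
-- ===== Notes on version B (the rewrite author's own statement) =====
-- stated objective: simpler
-- what changed: Replaces itertools.groupby with nested sub-iterator exhaustion by a single flat loop that tracks the current run's start index and value and yields a segment at each boundary, avoiding enumerate tuples and per-group grouper objects.
import Mathlib
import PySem

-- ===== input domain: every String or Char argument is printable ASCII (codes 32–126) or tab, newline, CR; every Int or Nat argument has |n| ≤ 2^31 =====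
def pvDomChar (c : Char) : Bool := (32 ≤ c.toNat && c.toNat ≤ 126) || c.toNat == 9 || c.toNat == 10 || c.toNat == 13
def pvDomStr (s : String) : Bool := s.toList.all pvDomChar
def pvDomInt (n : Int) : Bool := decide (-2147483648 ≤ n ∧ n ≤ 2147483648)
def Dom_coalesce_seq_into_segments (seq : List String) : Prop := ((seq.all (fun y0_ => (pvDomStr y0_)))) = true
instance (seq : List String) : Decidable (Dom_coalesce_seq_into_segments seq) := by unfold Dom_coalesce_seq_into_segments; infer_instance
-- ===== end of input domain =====

-- B replaces A's itertools.groupby with a single flat boundary-tracking loop (objective: simpler).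

-- ===== PORT A =====
-- enumerate(seq) (Python indices are ints)
def pvEnumFrom (i : Int) : List String → List (Int × String)
  | [] => []
  | x :: xs => (i, x) :: pvEnumFrom (i + 1) xs

-- the grouper exhaustion: 'while True: end_index = grouper.__next__()[0]' — consume the
-- remaining elements equal to the group key, returning the last consumed index and the rest
def pvConsume (key : String) (acc : Int) : List (Int × String) → Int × List (Int × String)
  | [] => (acc, [])
  | (j, t) :: l => if t == key then pvConsume key j l else (acc, (j, t) :: l)

theorem pvConsume_len (key : String) (acc : Int) (l : List (Int × String)) :
    (pvConsume key acc l).2.length ≤ l.length := by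
  induction l generalizing acc with
  | nil => simp [pvConsume]
  | cons h t ih =>
      simp only [pvConsume]
      split
      · exact le_trans (ih _) (Nat.le_succ _)
      · simp

-- 'for seg in itertools.groupby(...)': take the group's first index, exhaust the grouper, yield
def pvGroups : List (Int × String) → List (String × Int × Int)
  | [] => []
  | (i, s) :: l =>
      let p := pvConsume s i l
      (s, i, p.1) :: pvGroups p.2
  termination_by l => l.length
  decreasing_by
    simpa using Nat.lt_succ_of_le (pvConsume_len s i l)

def coalesce_seq_into_segments (seq : List String) : List (String × Int × Int) :=
  pvGroups (pvEnumFrom 0 seq)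

-- ===== PORT B =====
-- the flat loop: prev = current run value, start = its start, i = current index
def pvFlat (prev : String) (start i : Int) : List String → List (String × Int × Int)
  | [] => [(prev, start, i - 1)]
  | y :: ys =>
      if y != prev then (prev, start, i - 1) :: pvFlat y i (i + 1) ys
      else pvFlat prev start (i + 1) ys

def coalesce_seq_into_segments_alt (seq : List String) : List (String × Int × Int) :=
  match seq with
  | [] => []
  | x :: xs => pvFlat x 0 1 xs

-- ===== PRECONDITION & SPEC =====
def Spec_coalesce_seq_into_segments (seq : List String) (out : List (String × Int × Int)) : Prop := out = coalesce_seq_into_segments_alt seq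
instance (seq : List String) (out : List (String × Int × Int)) : Decidable (Spec_coalesce_seq_into_segments seq out) := by unfold Spec_coalesce_seq_into_segments; infer_instance

-- ===== CLAIM (what is proved, stated in full; the proofs are below) =====
def Claim_equal_coalesce_seq_into_segments : Prop := ∀ (seq : List String), Dom_coalesce_seq_into_segments seq → Spec_coalesce_seq_into_segments seq (coalesce_seq_into_segments seq)

-- ===== LEMMAS AND PROOFS =====
theorem pvGroups_flat (xs : List String) (prev : String) (start i : Int) :
    (let p := pvConsume prev (i - 1) (pvEnumFrom i xs)
     (prev, start, p.1) :: pvGroups p.2) = pvFlat prev start i xs := by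
  induction xs generalizing prev start i with
  | nil => simp [pvEnumFrom, pvConsume, pvFlat, pvGroups]
  | cons y ys ih =>
      simp only [pvEnumFrom, pvConsume, pvFlat, bne]
      by_cases h : (y == prev) = true
      · simp only [h, if_true, Bool.not_true, Bool.false_eq_true, if_false]
        simpa using ih prev start (i + 1)
      · have hf : (y == prev) = false := by simpa using h
        simp only [hf, Bool.false_eq_true, if_false, Bool.not_false, if_true]
        rw [pvGroups.eq_def]
        simp only [pvConsume, hf, Bool.false_eq_true, if_false]
        simpa using ih y i (i + 1)

-- ===== VERDICT (by name: the statement is the Claim_ definition above) =====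
theorem coalesce_seq_into_segments_spec : Claim_equal_coalesce_seq_into_segments := by
  intro seq _
  unfold Spec_coalesce_seq_into_segments coalesce_seq_into_segments coalesce_seq_into_segments_alt
  cases seq with
  | nil => simp [pvEnumFrom, pvGroups]
  | cons x xs =>
      simp only [pvEnumFrom, pvGroups]
      have := pvGroups_flat xs x 0 1
      simpa using this
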